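-- pv_equiv track=rewrite | github.com/Wribbe/exjobb | msccls/figures/utils/__init__.py | incremental_sum
-- ===== SOURCE A (Python) =====
-- def incremental_sum(dic):
--   y_sum = 0
--   xs, ys = ([], [])
--   for x, y in sorted(dic.items()):
--     xs.append(x)
--     y_sum += y
--     ys.append(y_sum)
--   return (xs,ys)
-- ===== SOURCE B (Python) =====
-- def incremental_sum(dic):
--   items = sorted(dic.items())
--   xs = [k for k, _ in items]
--   total = sum(v for _, v in items)
--   ys = []
--   for _, v in reversed(items):
--     ys.append(total)
--     total -= v
--   ys.reverse()
--   return (xs, ys)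
-- ===== Notes on version B (the rewrite author's own statement) =====
-- stated objective: alternative
-- what changed: Instead of A's forward fused loop with a running total growing both lists, B extracts the keys by a comprehension, computes the grand total of the values once, then walks the sorted items in reverse building ys back-to-front by recording the total and subtracting each value, reversing ys at the end.
import Mathlib
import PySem

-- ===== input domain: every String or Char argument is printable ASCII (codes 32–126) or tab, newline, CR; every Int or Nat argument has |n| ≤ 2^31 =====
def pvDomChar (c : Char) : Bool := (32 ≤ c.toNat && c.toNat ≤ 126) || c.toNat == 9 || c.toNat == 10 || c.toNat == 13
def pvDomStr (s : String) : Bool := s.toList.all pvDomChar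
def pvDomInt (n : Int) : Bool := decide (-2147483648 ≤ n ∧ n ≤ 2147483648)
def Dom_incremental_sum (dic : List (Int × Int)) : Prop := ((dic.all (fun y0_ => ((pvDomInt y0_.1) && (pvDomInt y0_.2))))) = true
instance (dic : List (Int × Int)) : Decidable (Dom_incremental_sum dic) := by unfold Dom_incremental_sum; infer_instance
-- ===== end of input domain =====

-- B replaces A's forward fused loop by: keys by comprehension, the grand total of the values,
-- then a reverse walk building the prefix-sum list back-to-front by subtraction, reversed at the end.


-- ===== PORT A =====
-- One fused loop over sorted(dic.items()) with state (xs, ys, y_sum).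
def incremental_sum (dic : List (Int × Int)) : List Int × List Int :=
  let st := (PySem.List.sorted2 (PySem.Dict.ofList dic).items Prod.fst Prod.snd).foldl
    (fun (st : List Int × List Int × Int) p =>
      (st.1 ++ [p.1], st.2.1 ++ [st.2.2 + p.2], st.2.2 + p.2))
    ([], [], 0)
  (st.1, st.2.1)

-- ===== PORT B =====
-- keys by comprehension; grand total of the values; reverse walk building ys back-to-front; final reverse.
def incremental_sum_alt (dic : List (Int × Int)) : List Int × List Int :=
  let items := PySem.List.sorted2 (PySem.Dict.ofList dic).items Prod.fst Prod.snd
  let xs := items.map Prod.fst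
  let total := items.foldl (fun s p => s + p.2) 0     -- sum(v for _, v in items)
  let st := items.reverse.foldl
    (fun (st : List Int × Int) p => (st.1 ++ [st.2], st.2 - p.2)) ([], total)
  (xs, st.1.reverse)

-- ===== PRECONDITION & SPEC =====
def Spec_incremental_sum (dic : List (Int × Int)) (out : List Int × List Int) : Prop := out = incremental_sum_alt dic
instance (dic : List (Int × Int)) (out : List Int × List Int) : Decidable (Spec_incremental_sum dic out) := by unfold Spec_incremental_sum; infer_instance

-- ===== CLAIM (what is proved, stated in full; the proofs are below) =====
def Claim_equal_incremental_sum : Prop := ∀ (dic : List (Int × Int)), Dom_incremental_sum dic → Spec_incremental_sum dic (incremental_sum dic)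

-- ===== LEMMAS AND PROOFS =====
-- Reference prefix sums of the values, used only to relate the two loops.
def psums (l : List (Int × Int)) (s : Int) : List Int :=
  match l with
  | [] => []
  | p :: t => (s + p.2) :: psums t (s + p.2)

theorem sumv_foldl (l : List (Int × Int)) : ∀ (s : Int),
    l.foldl (fun s p => s + p.2) s = s + (l.map Prod.snd).sum := by
  induction l with
  | nil => intro s; simp
  | cons p t ih => intro s; simp [ih]; ring

-- A's fold from accumulated state (xs, ys, s) appends the keys and the forward prefix sums.
theorem loopA (l : List (Int × Int)) :
    ∀ (xs ys : List Int) (s : Int),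
      l.foldl (fun (st : List Int × List Int × Int) p =>
          (st.1 ++ [p.1], st.2.1 ++ [st.2.2 + p.2], st.2.2 + p.2)) (xs, ys, s)
        = (xs ++ l.map Prod.fst, ys ++ psums l s, s + (l.map Prod.snd).sum) := by
  induction l with
  | nil => intro xs ys s; simp [psums]
  | cons p t ih =>
      intro xs ys s
      simp only [List.foldl_cons]
      rw [ih (xs ++ [p.1]) (ys ++ [s + p.2]) (s + p.2)]
      simp [psums, List.append_assoc]
      ring

-- B's reverse walk from total T yields the reversed prefix sums started at T - sum.
theorem loopB (l : List (Int × Int)) :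
    ∀ (T : Int),
      l.reverse.foldl (fun (st : List Int × Int) p => (st.1 ++ [st.2], st.2 - p.2)) ([], T)
        = ((psums l (T - (l.map Prod.snd).sum)).reverse, T - (l.map Prod.snd).sum) := by
  induction l with
  | nil => intro T; simp [psums]
  | cons p t ih =>
      intro T
      rw [List.reverse_cons, List.foldl_append, ih T]
      have e1 : T - (List.map Prod.snd (p :: t)).sum + p.2 = T - (List.map Prod.snd t).sum := by
        simp; ring
      have e2 : T - (List.map Prod.snd t).sum - p.2 = T - (List.map Prod.snd (p :: t)).sum := by
        simp; ring
      simp only [List.foldl_cons, List.foldl_nil, psums, e1, e2, List.reverse_cons]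

-- The two algorithms agree on any item list (applied to the sorted items of the dict).
theorem main_eq (l : List (Int × Int)) :
    (let st := l.foldl (fun (st : List Int × List Int × Int) p =>
        (st.1 ++ [p.1], st.2.1 ++ [st.2.2 + p.2], st.2.2 + p.2)) ([], [], 0);
     (st.1, st.2.1))
      = (let xs := l.map Prod.fst;
         let total := l.foldl (fun s p => s + p.2) 0;
         let st := l.reverse.foldl
           (fun (st : List Int × Int) p => (st.1 ++ [st.2], st.2 - p.2)) ([], total);
         (xs, st.1.reverse)) := by
  simp only [loopA, sumv_foldl, loopB]
  simp

-- ===== VERDICT (by name: the statement is the Claim_ definition above) =====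
theorem incremental_sum_spec : Claim_equal_incremental_sum := by
  intro dic _
  unfold Spec_incremental_sum incremental_sum incremental_sum_alt
  exact main_eq _
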